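-- pv_equiv track=rewrite | github.com/Hiroki39/CS-UY-1134 | Homework/hz2212_hw4_q6.py | appearances
-- ===== SOURCE A (Python) =====
-- def appearances(s, low, high):
--     if low == high:
--         return {s[low]: 1}
--     dict = appearances(s, low + 1, high)
--     if s[low] not in dict:
--         dict[s[low]] = 1
--         return dict
--     dict[s[low]] += 1
--     return dict
-- ===== SOURCE B (Python) =====
-- def appearances(s, low, high):
--     result = {s[high]: 1}
--     for i in range(high - 1, low - 1, -1):
--         result[s[i]] = result.get(s[i], 0) + 1
--     return result
-- ===== Notes on version B (the rewrite author's own statement) =====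
-- stated objective: simpler
-- what changed: Replaces the recursion from low up to high (dict built while unwinding) with an iterative loop: start from the base case {s[high]: 1} and fold the indices high-1 down to low into a running counter dict; no recursion, no call stack.
import Mathlib
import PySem

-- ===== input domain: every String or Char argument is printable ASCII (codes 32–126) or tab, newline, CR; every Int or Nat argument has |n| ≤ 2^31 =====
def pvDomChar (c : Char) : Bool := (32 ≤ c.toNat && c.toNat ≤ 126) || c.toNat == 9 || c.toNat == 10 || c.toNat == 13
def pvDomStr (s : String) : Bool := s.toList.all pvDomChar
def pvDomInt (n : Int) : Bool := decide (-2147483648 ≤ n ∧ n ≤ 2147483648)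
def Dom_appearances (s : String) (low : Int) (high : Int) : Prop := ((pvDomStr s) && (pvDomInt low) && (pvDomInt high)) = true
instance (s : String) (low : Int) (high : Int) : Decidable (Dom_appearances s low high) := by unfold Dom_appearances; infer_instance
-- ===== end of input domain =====

-- B replaces A's recursion (dict built while unwinding) by one iterative counting loop:
-- base case {s[high]: 1}, then range(high-1, low-1, -1); same values, same key order,
-- no recursion (objective: simpler).

-- ===== PORT A =====
-- s[i] as a one-character Python string; the default is unreachable under Pre_ (valid indices).
def pyCharAt (s : String) (i : Int) : String := ((PySem.Str.pyGet? s i).getD ' ').toString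

-- fuel makes A's recursion total; under Pre_ (low ≤ high) the fuel (high-low).toNat+1 suffices,
-- so the fuel-exhausted branch is never taken (outside Pre_ Python A raises RecursionError).
def appearancesFuel : Nat → String → Int → Int → PySem.Dict String Int
  | 0, _, _, _ => PySem.Dict.empty
  | n + 1, s, low, high =>
    if low = high then PySem.Dict.empty.insert (pyCharAt s low) 1
    else
      let d := appearancesFuel n s (low + 1) high
      if d.contains (pyCharAt s low) = false then d.insert (pyCharAt s low) 1
      else d.insert (pyCharAt s low) (d.getD (pyCharAt s low) 0 + 1)

def appearances (s : String) (low : Int) (high : Int) : List (String × Int) :=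
  (appearancesFuel ((high - low).toNat + 1) s low high).items

-- ===== PORT B =====
-- iterative form of A's recurrence: start from the base case {s[high]: 1}, then fold the
-- remaining indices high-1, …, low into the running counter (no recursion).
def appearances_alt (s : String) (low : Int) (high : Int) : List (String × Int) :=
  ((PySem.List.pyRange (high - 1) (low - 1) (-1)).foldl
      (fun d i => d.insert (pyCharAt s i) (d.getD (pyCharAt s i) 0 + 1))
      (PySem.Dict.empty.insert (pyCharAt s high) 1)).items

-- ===== PRECONDITION & SPEC =====
-- Pre_: exactly where Python A returns: low ≤ high (else the recursion never reaches its base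
-- case, RecursionError) and every index in [low, high] is valid for s (else IndexError).
def Pre_appearances (s : String) (low : Int) (high : Int) : Prop :=
  low ≤ high ∧ -(s.toList.length : Int) ≤ low ∧ high < (s.toList.length : Int)
instance (s : String) (low : Int) (high : Int) : Decidable (Pre_appearances s low high) := by
  unfold Pre_appearances; infer_instance

def pvWitness_appearances : String × Int × Int := ("abca", 0, 3)

def Spec_appearances (s : String) (low : Int) (high : Int) (out : List (String × Int)) : Prop := out = appearances_alt s low high
instance (s : String) (low : Int) (high : Int) (out : List (String × Int)) : Decidable (Spec_appearances s low high out) := by unfold Spec_appearances; infer_instance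

-- ===== CLAIM (what is proved, stated in full; the proofs are below) =====
def Claim_equal_appearances : Prop := ∀ (s : String) (low : Int) (high : Int), Dom_appearances s low high → Pre_appearances s low high → Spec_appearances s low high (appearances s low high)

-- ===== LEMMAS AND PROOFS =====

-- countdown ranges extend on the right: range(a, b-1, -1) = range(a, b, -1) ++ [b]  (b ≤ a)
lemma pyRange_neg_one_pred (a b : Int) (h : b ≤ a) :
    PySem.List.pyRange a (b - 1) (-1) = PySem.List.pyRange a b (-1) ++ [b] := by
  rw [PySem.List.pyRange_neg_one_eq_reverse, PySem.List.pyRange_neg_one_eq_reverse,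
    show b - 1 + 1 = b by ring, PySem.List.pyRange_one_cons (by omega : b < a + 1)]
  simp

lemma appearancesFuel_eq (n : Nat) (s : String) (low high : Int)
    (hle : low ≤ high) (hn : (high - low).toNat < n) :
    appearancesFuel n s low high =
      (PySem.List.pyRange (high - 1) (low - 1) (-1)).foldl
        (fun d i => d.insert (pyCharAt s i) (d.getD (pyCharAt s i) 0 + 1))
        (PySem.Dict.empty.insert (pyCharAt s high) 1) := by
  induction n generalizing low with
  | zero => omega
  | succ n ih =>
    by_cases hb : low = high
    · subst hb
      rw [PySem.List.pyRange_neg_one_eq_nil (by omega)]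
      simp [appearancesFuel]
    · have hlt : low < high := lt_of_le_of_ne hle hb
      rw [pyRange_neg_one_pred (high - 1) low (by omega), List.foldl_append]
      have hrec : appearancesFuel n s (low + 1) high =
          (PySem.List.pyRange (high - 1) (low + 1 - 1) (-1)).foldl
            (fun d i => d.insert (pyCharAt s i) (d.getD (pyCharAt s i) 0 + 1))
            (PySem.Dict.empty.insert (pyCharAt s high) 1) := ih (low + 1) (by omega) (by omega)
      rw [show low + 1 - 1 = low by ring] at hrec
      simp only [appearancesFuel, if_neg hb, ← hrec, List.foldl_cons, List.foldl_nil]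
      by_cases hc : (appearancesFuel n s (low + 1) high).contains (pyCharAt s low) = false
      · rw [if_pos hc, PySem.Dict.getD_of_not_contains _ _ hc]; norm_num
      · rw [if_neg hc]

-- ===== VERDICT (by name: the statement is the Claim_ definition above) =====
theorem appearances_spec : Claim_equal_appearances := by
  intro s low high _ hpre
  unfold Spec_appearances appearances appearances_alt
  rw [appearancesFuel_eq _ s low high hpre.1 (by omega)]
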